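-- pv_equiv track=rewrite | github.com/ismaelucky342/Optimal-Transportation | Tiny_version_codewars/Optimal_transportation_CW.py | get_basic_solution_min_price_method
-- ===== SOURCE A (Python) =====
-- def get_basic_solution_min_price_method(table, suppliers, consumers, costs):
--     # Create a sorted queue of cells based on cost in descending order
--     cells_queue = sorted([(j, i) for i in range(len(costs[0])) for j in range(len(costs))], key=lambda x: costs[x[0]][x[1]], reverse=True)
--
--     # Initialize basis cells for rows and columns
--     rows_basis_cells = [[] for _ in range(len(costs))]
--     columns_basis_cells = [[] for _ in range(len(costs[0]))]
--     rows = set(range(len(costs)))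
--     cols = set(range(len(costs[0])))
--
--     while cells_queue:
--         curr_j, curr_i = cells_queue.pop()
--         if curr_j not in rows or curr_i not in cols:
--             continue
--
--         # Allocate supply and demand to the current cell
--         supply, demand = suppliers[curr_j], consumers[curr_i]
--         allocation = min(supply, demand)
--         table[curr_j][curr_i] = allocation
--         rows_basis_cells[curr_j].append((curr_j, curr_i))
--         columns_basis_cells[curr_i].append((curr_j, curr_i))
--
--         # Update suppliers and consumers based on the allocation
--         if supply == demand:
--             suppliers[curr_j] = 0
--             cols.remove(curr_i)
--         elif supply < demand:
--             suppliers[curr_j] = 0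
--             consumers[curr_i] -= supply
--             rows.remove(curr_j)
--         else:
--             consumers[curr_i] = 0
--             suppliers[curr_j] -= demand
--             cols.remove(curr_i)
--
--         if not rows or not cols:
--             break
--
--     # Initialize default values for j and i
--     j, i = 0, 0
--
--     # Handle degenerate case
--     if sum(len(cells) for cells in rows_basis_cells) < len(costs) + len(costs[0]) - 1:
--         aux_queue = sorted([(j, i) for i in range(len(costs[0])) for j in range(len(costs)) if table[j][i] is None], key=lambda x: costs[x[0]][x[1]])
--         if aux_queue:
--             j, i = aux_queue[0]
--             table[j][i] = 0
--             rows_basis_cells[j].append((j, i))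
--             columns_basis_cells[i].append((j, i))
--
--     return rows_basis_cells, columns_basis_cells, (j, i)
-- ===== SOURCE B (Python) =====
-- # Least-cost method by repeated scanning over the active rows/columns instead of
-- # pre-sorting all cells; same return value (mutates table/suppliers/consumers like A).
-- def _scan_min(cands, costs):
--     # first cell of cands with strictly minimal cost
--     best = None
--     for (j, i) in cands:
--         if best is None or costs[j][i] < costs[best[0]][best[1]]:
--             best = (j, i)
--     return best
--
--
-- def get_basic_solution_min_price_method(table, suppliers, consumers, costs):
--     m, n = len(costs), len(costs[0])
--     rows_basis_cells = [[] for _ in range(m)]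
--     columns_basis_cells = [[] for _ in range(n)]
--     rows = set(range(m))
--     cols = set(range(n))
--
--     while rows and cols:
--         # scanning in reverse column-major order, the first strict minimum is the
--         # cheapest active cell (ties: last in column-major order)
--         cands = [(j, i) for i in range(n - 1, -1, -1) if i in cols
--                  for j in range(m - 1, -1, -1) if j in rows]
--         j, i = _scan_min(cands, costs)
--
--         supply, demand = suppliers[j], consumers[i]
--         allocation = min(supply, demand)
--         table[j][i] = allocation
--         rows_basis_cells[j].append((j, i))
--         columns_basis_cells[i].append((j, i))
--
--         if supply == demand:
--             suppliers[j] = 0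
--             cols.remove(i)
--         elif supply < demand:
--             suppliers[j] = 0
--             consumers[i] -= supply
--             rows.remove(j)
--         else:
--             consumers[i] = 0
--             suppliers[j] -= demand
--             cols.remove(i)
--
--     j0, i0 = 0, 0
--     if sum(len(cells) for cells in rows_basis_cells) < m + n - 1:
--         free = [(j, i) for i in range(n) for j in range(m) if table[j][i] is None]
--         best = _scan_min(free, costs)
--         if best is not None:
--             j0, i0 = best
--             table[j0][i0] = 0
--             rows_basis_cells[j0].append((j0, i0))
--             columns_basis_cells[i0].append((j0, i0))
--
--     return rows_basis_cells, columns_basis_cells, (j0, i0)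
-- ===== Notes on version B (the rewrite author's own statement) =====
-- stated objective: alternative
-- what changed: A pre-sorts all m*n cells by cost (descending, stable) and pops from the end, skipping dead cells; B keeps active row/column sets and each iteration rescans the still-active cells for the minimum-cost cell (ties broken the same way: last in column-major order), and picks the degenerate fix-up cell by a single first-minimum scan instead of sorting.
import Mathlib
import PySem

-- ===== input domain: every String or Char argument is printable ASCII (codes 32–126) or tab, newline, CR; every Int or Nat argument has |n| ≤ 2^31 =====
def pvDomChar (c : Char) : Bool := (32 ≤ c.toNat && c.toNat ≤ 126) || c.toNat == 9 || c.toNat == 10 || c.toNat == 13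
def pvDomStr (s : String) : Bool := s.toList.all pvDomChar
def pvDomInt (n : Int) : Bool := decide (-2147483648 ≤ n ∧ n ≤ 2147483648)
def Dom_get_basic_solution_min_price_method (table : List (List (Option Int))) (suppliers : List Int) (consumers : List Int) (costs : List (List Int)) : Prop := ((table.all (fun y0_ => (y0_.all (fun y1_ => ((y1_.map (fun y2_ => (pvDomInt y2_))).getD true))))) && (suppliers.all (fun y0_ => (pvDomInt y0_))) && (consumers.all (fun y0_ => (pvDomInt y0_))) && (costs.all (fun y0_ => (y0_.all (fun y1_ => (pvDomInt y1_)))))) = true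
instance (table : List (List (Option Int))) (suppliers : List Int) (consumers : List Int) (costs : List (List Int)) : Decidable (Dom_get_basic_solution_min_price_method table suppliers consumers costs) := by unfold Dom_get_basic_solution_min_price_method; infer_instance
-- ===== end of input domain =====

-- B replaces A's global pre-sort of all cells by a rescanning least-cost search over the
-- active rows/columns (same return value; like A, the Python mutates table/suppliers/consumers
-- in place — the equivalence proved here is about the return value).

-- costs[c[0]][c[1]] (both Pythons use this lookup; in range under Pre_)
def pvCost (costs : List (List Int)) (c : Int × Int) : Int :=
  PySem.List.pyGetD (PySem.List.pyGetD costs c.1 []) c.2 0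

-- lst[k][idx] = v  (in range whenever executed under Pre_)
def pvSet2 (t : List (List (Option Int))) (j i : Int) (v : Option Int) : List (List (Option Int)) :=
  PySem.List.pySetD t j (PySem.List.pySetD (PySem.List.pyGetD t j []) i v)

-- lst[k].append(c)
def pvAppendAt (lst : List (List (Int × Int))) (k : Int) (c : Int × Int) : List (List (Int × Int)) :=
  PySem.List.pySetD lst k (PySem.List.pyGetD lst k [] ++ [c])

-- the update of suppliers/consumers/active sets after an allocation (this block is
-- verbatim identical in both Pythons, so both ports share it)
def pvUpd (j i supply demand : Int) (sup con : List Int) (rows cols : PySem.Set Int) :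
    List Int × List Int × PySem.Set Int × PySem.Set Int :=
  if supply = demand then
    (PySem.List.pySetD sup j 0, con, rows, (PySem.Set.remove? cols i).getD cols)
  else if supply < demand then
    (PySem.List.pySetD sup j 0, PySem.List.pySetD con i (demand - supply),
     (PySem.Set.remove? rows j).getD rows, cols)
  else
    (PySem.List.pySetD sup j (supply - demand), PySem.List.pySetD con i 0, rows,
     (PySem.Set.remove? cols i).getD cols)

-- ===== PORT A =====

-- A's while loop, recursing over the reversed sorted queue (list.pop() takes the last
-- element, so the pops consume cells_queue.reverse front to back).
def pvLoopA (costs : List (List Int)) (rq : List (Int × Int))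
    (table : List (List (Option Int))) (sup con : List Int)
    (rowsB colsB : List (List (Int × Int))) (rows cols : PySem.Set Int) :
    List (List (Option Int)) × List (List (Int × Int)) × List (List (Int × Int)) :=
  match rq with
  | [] => (table, rowsB, colsB)
  | c :: rest =>
    let j := c.1
    let i := c.2
    if !(rows.contains j) || !(cols.contains i) then
      pvLoopA costs rest table sup con rowsB colsB rows cols
    else
      let supply := PySem.List.pyGetD sup j 0
      let demand := PySem.List.pyGetD con i 0
      let table' := pvSet2 table j i (some (min supply demand))
      let rowsB' := pvAppendAt rowsB j (j, i)
      let colsB' := pvAppendAt colsB i (j, i)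
      let upd := pvUpd j i supply demand sup con rows cols
      if upd.2.2.1.isEmpty || upd.2.2.2.isEmpty then (table', rowsB', colsB')
      else pvLoopA costs rest table' upd.1 upd.2.1 rowsB' colsB' upd.2.2.1 upd.2.2.2

def get_basic_solution_min_price_method (table : List (List (Option Int))) (suppliers : List Int) (consumers : List Int) (costs : List (List Int)) : (List (List (Int × Int))) × (List (List (Int × Int))) × (Int × Int) :=
  let m : Int := costs.length
  let n : Int := (PySem.List.pyGetD costs 0 []).length   -- len(costs[0]); costs ≠ [] under Pre_
  let queue := PySem.List.sorted
    ((PySem.List.pyRange 0 n 1).flatMap fun i => (PySem.List.pyRange 0 m 1).map fun j => ((j, i) : Int × Int))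
    (pvCost costs) true
  let st := pvLoopA costs queue.reverse table suppliers consumers
    ((PySem.List.pyRange 0 m 1).map fun _ => ([] : List (Int × Int)))
    ((PySem.List.pyRange 0 n 1).map fun _ => ([] : List (Int × Int)))
    (PySem.Set.ofList (PySem.List.pyRange 0 m 1)) (PySem.Set.ofList (PySem.List.pyRange 0 n 1))
  let tbl := st.1
  let rB := st.2.1
  let cB := st.2.2
  -- degenerate case (the final table write is dead for the return value and is omitted)
  if (rB.map fun l => (l.length : Int)).sum < m + n - 1 then
    let aux := PySem.List.sorted
      ((PySem.List.pyRange 0 n 1).flatMap fun i =>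
        ((PySem.List.pyRange 0 m 1).filter fun j =>
          (PySem.List.pyGetD (PySem.List.pyGetD tbl j []) i (some 0)).isNone).map fun j => ((j, i) : Int × Int))
      (pvCost costs) false
    match aux with
    | [] => (rB, cB, ((0 : Int), (0 : Int)))
    | c :: _ => (pvAppendAt rB c.1 c, pvAppendAt cB c.2 c, (c.1, c.2))
  else (rB, cB, ((0 : Int), (0 : Int)))

-- ===== PORT B =====

-- _scan_min: first candidate with strictly minimal cost
def pvScanMin (costs : List (List Int)) (cands : List (Int × Int)) : Option (Int × Int) :=
  cands.foldl
    (fun best c =>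
      match best with
      | none => some c
      | some b => if pvCost costs c < pvCost costs b then some c else best)
    none

-- the candidate list of B's main loop: active cells in reverse column-major order
def pvCands (m n : Int) (rows cols : PySem.Set Int) : List (Int × Int) :=
  ((PySem.List.pyRange (n - 1) (-1) (-1)).filter fun i => cols.contains i).flatMap fun i =>
    ((PySem.List.pyRange (m - 1) (-1) (-1)).filter fun j => rows.contains j).map fun j => ((j, i) : Int × Int)

-- (termination facts for pvLoopB; cited by its decreasing_by)
lemma pvScanFold_mem (costs : List (List Int)) :
    ∀ (l : List (Int × Int)) (acc : Option (Int × Int)) (c : Int × Int),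
      l.foldl (fun best c =>
        match best with
        | none => some c
        | some b => if pvCost costs c < pvCost costs b then some c else best) acc = some c →
      acc = some c ∨ c ∈ l := by
  intro l
  induction l with
  | nil => intro acc c h; exact Or.inl h
  | cons x xs ih =>
    intro acc c h
    rcases ih _ _ h with h' | h'
    · match acc with
      | none => simp at h'; subst h'; exact Or.inr (List.mem_cons_self)
      | some b =>
        by_cases hc : pvCost costs x < pvCost costs b
        · simp [hc] at h'; subst h'; exact Or.inr List.mem_cons_self
        · simp [hc] at h'; exact Or.inl (by simp [h'])
    · exact Or.inr (List.mem_cons_of_mem _ h')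

lemma pvScanMin_mem (costs : List (List Int)) (l : List (Int × Int)) (c : Int × Int)
    (h : pvScanMin costs l = some c) : c ∈ l := by
  rcases pvScanFold_mem costs l none c h with h' | h'
  · cases h'
  · exact h'

lemma pvCands_contains (m n : Int) (rows cols : PySem.Set Int) (c : Int × Int)
    (h : c ∈ pvCands m n rows cols) : rows.contains c.1 = true ∧ cols.contains c.2 = true := by
  simp only [pvCands, List.mem_flatMap, List.mem_filter, List.mem_map] at h
  obtain ⟨i, ⟨-, hi⟩, j, ⟨-, hj⟩, rfl⟩ := h
  exact ⟨hj, hi⟩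

lemma pvRemove_length (s : PySem.Set Int) (x : Int) (h : s.contains x = true) :
    ((PySem.Set.remove? s x).getD s).length < s.length := by
  simp only [PySem.Set.remove?, h, if_true, Option.getD_some]
  simp only [PySem.Set.discard]
  refine List.length_filter_lt_length_iff_exists.mpr ?_
  refine ⟨x, ?_, by simp⟩
  simpa using h

lemma pvUpd_decr (j i supply demand : Int) (sup con : List Int) (rows cols : PySem.Set Int)
    (hj : rows.contains j = true) (hi : cols.contains i = true) :
    (pvUpd j i supply demand sup con rows cols).2.2.1.length +
      (pvUpd j i supply demand sup con rows cols).2.2.2.length < rows.length + cols.length := by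
  unfold pvUpd
  split_ifs with h1 h2
  · have := pvRemove_length cols i hi; dsimp only; omega
  · have := pvRemove_length rows j hj; dsimp only; omega
  · have := pvRemove_length cols i hi; dsimp only; omega

-- B's while loop over the active row/column sets
def pvLoopB (costs : List (List Int)) (m n : Int)
    (table : List (List (Option Int))) (sup con : List Int)
    (rowsB colsB : List (List (Int × Int))) (rows cols : PySem.Set Int) :
    List (List (Option Int)) × List (List (Int × Int)) × List (List (Int × Int)) :=
  if rows.isEmpty || cols.isEmpty then (table, rowsB, colsB)
  else
    match hs : pvScanMin costs (pvCands m n rows cols) with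
    | none => (table, rowsB, colsB)  -- unreachable in Python (rows and cols nonempty)
    | some c =>
      let j := c.1
      let i := c.2
      let supply := PySem.List.pyGetD sup j 0
      let demand := PySem.List.pyGetD con i 0
      let table' := pvSet2 table j i (some (min supply demand))
      let rowsB' := pvAppendAt rowsB j (j, i)
      let colsB' := pvAppendAt colsB i (j, i)
      let upd := pvUpd j i supply demand sup con rows cols
      pvLoopB costs m n table' upd.1 upd.2.1 rowsB' colsB' upd.2.2.1 upd.2.2.2
termination_by rows.length + cols.length
decreasing_by
  have hmem := pvScanMin_mem costs _ _ hs
  have hc := pvCands_contains m n rows cols _ hmem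
  exact pvUpd_decr _ _ _ _ _ _ _ _ hc.1 hc.2

def get_basic_solution_min_price_method_alt (table : List (List (Option Int))) (suppliers : List Int) (consumers : List Int) (costs : List (List Int)) : (List (List (Int × Int))) × (List (List (Int × Int))) × (Int × Int) :=
  let m : Int := costs.length
  let n : Int := (PySem.List.pyGetD costs 0 []).length   -- len(costs[0]); costs ≠ [] under Pre_
  let st := pvLoopB costs m n table suppliers consumers
    ((PySem.List.pyRange 0 m 1).map fun _ => ([] : List (Int × Int)))
    ((PySem.List.pyRange 0 n 1).map fun _ => ([] : List (Int × Int)))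
    (PySem.Set.ofList (PySem.List.pyRange 0 m 1)) (PySem.Set.ofList (PySem.List.pyRange 0 n 1))
  let tbl := st.1
  let rB := st.2.1
  let cB := st.2.2
  if (rB.map fun l => (l.length : Int)).sum < m + n - 1 then
    let free := (PySem.List.pyRange 0 n 1).flatMap fun i =>
      ((PySem.List.pyRange 0 m 1).filter fun j =>
        (PySem.List.pyGetD (PySem.List.pyGetD tbl j []) i (some 0)).isNone).map fun j => ((j, i) : Int × Int)
    match pvScanMin costs free with
    | none => (rB, cB, ((0 : Int), (0 : Int)))
    | some c => (pvAppendAt rB c.1 c, pvAppendAt cB c.2 c, (c.1, c.2))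
  else (rB, cB, ((0 : Int), (0 : Int)))

-- ===== PRECONDITION & SPEC =====
-- Pre_ excludes (a) empty costs / a costs row shorter than costs[0] (A's sort key raises
-- IndexError) and (b), when costs[0] is nonempty, table/suppliers/consumers shorter than the
-- m×n grid of costs, on which A generally raises IndexError — this part slightly over-excludes:
-- a run can happen never to touch the missing entries and return (B returns the same value there).
def Pre_get_basic_solution_min_price_method (table : List (List (Option Int))) (suppliers : List Int) (consumers : List Int) (costs : List (List Int)) : Prop :=
  costs ≠ [] ∧
  ((costs.headD []).length = 0 ∨
    ((∀ row ∈ costs, (costs.headD []).length ≤ row.length) ∧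
     costs.length ≤ suppliers.length ∧
     (costs.headD []).length ≤ consumers.length ∧
     costs.length ≤ table.length ∧
     (∀ row ∈ table, (costs.headD []).length ≤ row.length)))
instance (table : List (List (Option Int))) (suppliers : List Int) (consumers : List Int) (costs : List (List Int)) : Decidable (Pre_get_basic_solution_min_price_method table suppliers consumers costs) := by unfold Pre_get_basic_solution_min_price_method; infer_instance

def pvWitness_get_basic_solution_min_price_method : List (List (Option Int)) × List Int × List Int × List (List Int) :=
  ([[none, none], [none, none]], [3, 4], [5, 2], [[1, 2], [2, 1]])

def Spec_get_basic_solution_min_price_method (table : List (List (Option Int))) (suppliers : List Int) (consumers : List Int) (costs : List (List Int)) (out : (List (List (Int × Int))) × (List (List (Int × Int))) × (Int × Int)) : Prop := out = get_basic_solution_min_price_method_alt table suppliers consumers costs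
instance (table : List (List (Option Int))) (suppliers : List Int) (consumers : List Int) (costs : List (List Int)) (out : (List (List (Int × Int))) × (List (List (Int × Int))) × (Int × Int)) : Decidable (Spec_get_basic_solution_min_price_method table suppliers consumers costs out) := by unfold Spec_get_basic_solution_min_price_method; infer_instance

-- ===== CLAIM (what is proved, stated in full; the proofs are below) =====
def Claim_equal_get_basic_solution_min_price_method : Prop := ∀ (table : List (List (Option Int))) (suppliers : List Int) (consumers : List Int) (costs : List (List Int)), Dom_get_basic_solution_min_price_method table suppliers consumers costs → Pre_get_basic_solution_min_price_method table suppliers consumers costs → Spec_get_basic_solution_min_price_method table suppliers consumers costs (get_basic_solution_min_price_method table suppliers consumers costs)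

-- ===== LEMMAS AND PROOFS =====

-- strict column-major order on cells (the generation order of both Pythons' comprehensions)
def pvCM (a b : Int × Int) : Prop := a.2 < b.2 ∨ (a.2 = b.2 ∧ a.1 < b.1)

-- the order in which A's pops visit cells: ascending cost, ties later-column-major first
def pvPrec (costs : List (List Int)) (a b : Int × Int) : Prop :=
  pvCost costs a < pvCost costs b ∨ (pvCost costs b = pvCost costs a ∧ pvCM b a)

lemma pvCM_asymm {a b : Int × Int} (h1 : pvCM a b) (h2 : pvCM b a) : False := by
  unfold pvCM at h1 h2; omega

-- ---------- stability of PySem.List.sorted ----------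

lemma pvInsertBy_pairwise {α : Type} (before : α → α → Bool) (R Q : α → α → Prop)
    (P1 : ∀ x y, before x y = true → R x y)
    (P2 : ∀ x y z, before x y = true → R y z → R x z)
    (P3 : ∀ x y, before x y = false → Q y x → R y x)
    (x : α) : ∀ (acc : List α), acc.Pairwise R → (∀ a ∈ acc, Q a x) →
    (PySem.List.insertBy before x acc).Pairwise R := by
  intro acc
  induction acc with
  | nil => intro _ _; simp [PySem.List.insertBy]
  | cons y ys ih =>
    intro hacc hQ
    rw [List.pairwise_cons] at hacc
    by_cases hb : before x y = true
    · simp only [PySem.List.insertBy, hb, if_true]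
      refine List.Pairwise.cons ?_ (List.Pairwise.cons hacc.1 hacc.2)
      intro z hz
      rcases List.mem_cons.mp hz with rfl | hz'
      · exact P1 x z hb
      · exact P2 x y z hb (hacc.1 z hz')
    · simp only [PySem.List.insertBy, hb]
      refine List.Pairwise.cons ?_ (ih hacc.2 (fun a ha => hQ a (List.mem_cons_of_mem _ ha)))
      intro z hz
      rcases (PySem.List.mem_insertBy before x z ys).mp hz with rfl | hz'
      · exact P3 z y (by simpa using hb) (hQ y List.mem_cons_self)
      · exact hacc.1 z hz'

lemma pvFoldl_insertBy_pairwise {α : Type} (before : α → α → Bool) (R Q : α → α → Prop)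
    (P1 : ∀ x y, before x y = true → R x y)
    (P2 : ∀ x y z, before x y = true → R y z → R x z)
    (P3 : ∀ x y, before x y = false → Q y x → R y x)
    (xs : List α) : xs.Pairwise Q →
    ∀ (acc : List α), acc.Pairwise R → (∀ a ∈ acc, ∀ b ∈ xs, Q a b) →
    (xs.foldl (fun acc x => PySem.List.insertBy before x acc) acc).Pairwise R := by
  induction xs with
  | nil => intro _ acc hacc _; simpa using hacc
  | cons x xs ih =>
    intro hxs acc hacc hQa
    rw [List.pairwise_cons] at hxs
    simp only [List.foldl_cons]
    refine ih hxs.2 _ ?_ ?_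
    · exact pvInsertBy_pairwise before R Q P1 P2 P3 x acc hacc
        (fun a ha => hQa a ha x List.mem_cons_self)
    · intro a ha b hb
      rcases (PySem.List.mem_insertBy before x a acc).mp ha with rfl | ha'
      · exact hxs.1 b hb
      · exact hQa a ha' b (List.mem_cons_of_mem _ hb)

lemma pvSorted_rev_pairwise (costs : List (List Int)) (xs : List (Int × Int))
    (h : xs.Pairwise pvCM) :
    (PySem.List.sorted xs (pvCost costs) true).Pairwise
      (fun a b => pvCost costs b < pvCost costs a ∨ (pvCost costs a = pvCost costs b ∧ pvCM a b)) := by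
  rw [PySem.List.sorted_rev_eq_foldl_insertBy]
  refine pvFoldl_insertBy_pairwise _ _ pvCM ?_ ?_ ?_ xs h [] (by simp) (by simp)
  · intro x y hb
    exact Or.inl (by simpa using hb)
  · intro x y z hb hyz
    simp only [decide_eq_true_eq] at hb
    rcases hyz with h1 | h1
    · exact Or.inl (lt_trans h1 hb)
    · exact Or.inl (by omega)
  · intro x y hb hq
    simp only [decide_eq_false_iff_not, not_lt] at hb
    rcases lt_or_eq_of_le hb with h1 | h1
    · exact Or.inl h1
    · exact Or.inr ⟨h1.symm, hq⟩

lemma pvSorted_fwd_pairwise (costs : List (List Int)) (xs : List (Int × Int))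
    (h : xs.Pairwise pvCM) :
    (PySem.List.sorted xs (pvCost costs) false).Pairwise
      (fun a b => pvCost costs a < pvCost costs b ∨ (pvCost costs a = pvCost costs b ∧ pvCM a b)) := by
  rw [PySem.List.sorted_eq_foldl_insertBy]
  refine pvFoldl_insertBy_pairwise _ _ pvCM ?_ ?_ ?_ xs h [] (by simp) (by simp)
  · intro x y hb
    exact Or.inl (by simpa using hb)
  · intro x y z hb hyz
    simp only [decide_eq_true_eq] at hb
    rcases hyz with h1 | h1
    · exact Or.inl (lt_trans hb h1)
    · exact Or.inl (by omega)
  · intro x y hb hq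
    simp only [decide_eq_false_iff_not, not_lt] at hb
    rcases lt_or_eq_of_le hb with h1 | h1
    · exact Or.inl h1
    · exact Or.inr ⟨h1, hq⟩

-- ---------- the scan finds the designated cell ----------

lemma pvScan_ge (costs : List (List Int)) (c : Int × Int) :
    ∀ (l : List (Int × Int)), (∀ d ∈ l, pvCost costs c ≤ pvCost costs d) →
    l.foldl (fun best d =>
      match best with
      | none => some d
      | some b => if pvCost costs d < pvCost costs b then some d else best) (some c) = some c := by
  intro l
  induction l with
  | nil => intro _; rfl
  | cons d ds ih =>
    intro h
    have hd : ¬ pvCost costs d < pvCost costs c := not_lt.mpr (h d List.mem_cons_self)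
    simp only [List.foldl_cons, hd, if_false]
    exact ih (fun e he => h e (List.mem_cons_of_mem _ he))

lemma pvScan_from (costs : List (List Int)) (c : Int × Int) :
    ∀ (l1 : List (Int × Int)) (a : Int × Int) (l2 : List (Int × Int)),
    pvCost costs c < pvCost costs a → (∀ d ∈ l1, pvCost costs c < pvCost costs d) →
    (∀ d ∈ l2, pvCost costs c ≤ pvCost costs d) →
    (l1 ++ c :: l2).foldl (fun best d =>
      match best with
      | none => some d
      | some b => if pvCost costs d < pvCost costs b then some d else best) (some a) = some c := by
  intro l1
  induction l1 with
  | nil =>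
    intro a l2 ha _ h2
    simp only [List.nil_append, List.foldl_cons, ha, if_true]
    exact pvScan_ge costs c l2 h2
  | cons d l1' ih =>
    intro a l2 ha h1 h2
    simp only [List.cons_append, List.foldl_cons]
    by_cases hd : pvCost costs d < pvCost costs a
    · simp only [hd, if_true]
      exact ih d l2 (h1 d List.mem_cons_self) (fun e he => h1 e (List.mem_cons_of_mem _ he)) h2
    · simp only [hd, if_false]
      exact ih a l2 ha (fun e he => h1 e (List.mem_cons_of_mem _ he)) h2

lemma pvScan_spec (costs : List (List Int)) (l1 : List (Int × Int)) (c : Int × Int)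
    (l2 : List (Int × Int)) (h1 : ∀ d ∈ l1, pvCost costs c < pvCost costs d)
    (h2 : ∀ d ∈ l2, pvCost costs c ≤ pvCost costs d) :
    pvScanMin costs (l1 ++ c :: l2) = some c := by
  cases l1 with
  | nil =>
    simp only [pvScanMin, List.nil_append, List.foldl_cons]
    exact pvScan_ge costs c l2 h2
  | cons a l1' =>
    simp only [pvScanMin, List.cons_append, List.foldl_cons]
    exact pvScan_from costs c l1' a l2 (h1 a List.mem_cons_self)
      (fun e he => h1 e (List.mem_cons_of_mem _ he)) h2

-- ---------- pairwise / membership of the generated cell lists ----------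

lemma pvGrid_pairwise_fwd (li : List Int) (lj : Int → List Int)
    (hi : li.Pairwise (· < ·)) (hj : ∀ i, (lj i).Pairwise (· < ·)) :
    (li.flatMap fun i => (lj i).map fun j => ((j, i) : Int × Int)).Pairwise pvCM := by
  rw [List.pairwise_flatMap]
  constructor
  · intro i _
    rw [List.pairwise_map]
    exact (hj i).imp (fun hab => Or.inr ⟨rfl, hab⟩)
  · refine hi.imp ?_
    intro i1 i2 h12 x hx y hy
    simp only [List.mem_map] at hx hy
    obtain ⟨j1, -, rfl⟩ := hx
    obtain ⟨j2, -, rfl⟩ := hy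
    exact Or.inl h12

lemma pvGrid_pairwise_rev (li : List Int) (lj : Int → List Int)
    (hi : li.Pairwise (· > ·)) (hj : ∀ i, (lj i).Pairwise (· > ·)) :
    (li.flatMap fun i => (lj i).map fun j => ((j, i) : Int × Int)).Pairwise (fun a b => pvCM b a) := by
  rw [List.pairwise_flatMap]
  constructor
  · intro i _
    rw [List.pairwise_map]
    exact (hj i).imp (fun hab => Or.inr ⟨rfl, hab⟩)
  · refine hi.imp ?_
    intro i1 i2 h12 x hx y hy
    simp only [List.mem_map] at hx hy
    obtain ⟨j1, -, rfl⟩ := hx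
    obtain ⟨j2, -, rfl⟩ := hy
    exact Or.inl h12

lemma pvCands_mem_iff (m n : Int) (rows cols : PySem.Set Int) (c : Int × Int) :
    c ∈ pvCands m n rows cols ↔
      (0 ≤ c.1 ∧ c.1 < m ∧ rows.contains c.1 = true ∧ 0 ≤ c.2 ∧ c.2 < n ∧ cols.contains c.2 = true) := by
  obtain ⟨cj, ci⟩ := c
  simp only [pvCands, List.mem_flatMap, List.mem_filter, List.mem_map,
    PySem.List.mem_pyRange_neg_one, Prod.mk.injEq]
  constructor
  · rintro ⟨i, ⟨⟨hi1, hi2⟩, hic⟩, j, ⟨⟨hj1, hj2⟩, hjc⟩, rfl, rfl⟩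
    refine ⟨by omega, by omega, hjc, by omega, by omega, hic⟩
  · rintro ⟨h1, h2, h3, h4, h5, h6⟩
    exact ⟨ci, ⟨⟨by omega, by omega⟩, h6⟩, cj, ⟨⟨by omega, by omega⟩, h3⟩, rfl, rfl⟩

lemma pvCountdown_pairwise (a : Int) : (PySem.List.pyRange a (-1) (-1)).Pairwise (· > ·) := by
  rw [PySem.List.pyRange_neg_one_eq_reverse, List.pairwise_reverse]
  exact PySem.List.pairwise_lt_pyRange_one _ _

lemma pvCands_pairwise (m n : Int) (rows cols : PySem.Set Int) :
    (pvCands m n rows cols).Pairwise (fun a b => pvCM b a) := by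
  refine pvGrid_pairwise_rev _ _ ?_ ?_
  · exact (pvCountdown_pairwise (n-1)).filter _
  · intro i; exact (pvCountdown_pairwise (m-1)).filter _

-- ---------- the selection equivalences ----------

lemma pvScan_picks (costs : List (List Int)) (m n : Int) (rows cols : PySem.Set Int)
    (j i : Int) (rest : List (Int × Int))
    (hpw : (((j, i) : Int × Int) :: rest).Pairwise (pvPrec costs))
    (hrange : ∀ c ∈ (((j, i) : Int × Int) :: rest), 0 ≤ c.1 ∧ c.1 < m ∧ 0 ≤ c.2 ∧ c.2 < n)
    (hact : ∀ j' i' : Int, rows.contains j' = true → cols.contains i' = true →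
      ((j', i') : Int × Int) ∈ (((j, i) : Int × Int) :: rest))
    (hj : rows.contains j = true) (hi : cols.contains i = true) :
    pvScanMin costs (pvCands m n rows cols) = some (j, i) := by
  have hr := hrange (j, i) List.mem_cons_self
  have hcand : ((j, i) : Int × Int) ∈ pvCands m n rows cols :=
    (pvCands_mem_iff m n rows cols (j, i)).mpr ⟨hr.1, hr.2.1, hj, hr.2.2.1, hr.2.2.2, hi⟩
  obtain ⟨l1, l2, hsplit⟩ := List.append_of_mem hcand
  have hpwc := pvCands_pairwise m n rows cols
  rw [hsplit] at hpwc
  rw [List.pairwise_append] at hpwc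
  have hprec : ∀ d ∈ pvCands m n rows cols, d ≠ ((j, i) : Int × Int) → pvPrec costs (j, i) d := by
    intro d hd hne
    have hc := (pvCands_mem_iff m n rows cols d).mp hd
    have hmem : d ∈ (((j, i) : Int × Int) :: rest) := by
      have := hact d.1 d.2 hc.2.2.1 hc.2.2.2.2.2
      simpa using this
    rcases List.mem_cons.mp hmem with h' | h'
    · exact absurd h' hne
    · exact (List.pairwise_cons.mp hpw).1 d h'
  rw [hsplit]
  refine pvScan_spec costs l1 (j, i) l2 ?_ ?_
  · intro d hd
    have hcm : pvCM (j, i) d := hpwc.2.2 d hd _ List.mem_cons_self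
    have hne : d ≠ ((j, i) : Int × Int) := by
      rintro rfl; exact pvCM_asymm hcm hcm
    have hdc : d ∈ pvCands m n rows cols := by rw [hsplit]; exact List.mem_append_left _ hd
    rcases hprec d hdc hne with h' | h'
    · exact h'
    · exact absurd h'.2 (fun hcm' => pvCM_asymm hcm hcm')
  · intro d hd
    have hne : d ≠ ((j, i) : Int × Int) := by
      rintro rfl
      have hcm : pvCM ((j, i) : Int × Int) ((j, i) : Int × Int) :=
        (List.pairwise_cons.mp hpwc.2.1).1 _ hd
      exact pvCM_asymm hcm hcm
    have hdc : d ∈ pvCands m n rows cols := by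
      rw [hsplit]; exact List.mem_append_right _ (List.mem_cons_of_mem _ hd)
    rcases hprec d hdc hne with h' | h'
    · exact le_of_lt h'
    · exact le_of_eq h'.1.symm

lemma pvAux_pick (costs : List (List Int)) (free : List (Int × Int))
    (hpw : free.Pairwise pvCM) (h : Int × Int) (t : List (Int × Int))
    (hs : PySem.List.sorted free (pvCost costs) false = h :: t) :
    pvScanMin costs free = some h := by
  have hmem : h ∈ free := by
    have : h ∈ PySem.List.sorted free (pvCost costs) false := by rw [hs]; exact List.mem_cons_self
    exact (PySem.List.mem_sorted _ _ _ _).mp this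
  obtain ⟨l1, l2, hsplit⟩ := List.append_of_mem hmem
  have hSf := pvSorted_fwd_pairwise costs free hpw
  rw [hs, List.pairwise_cons] at hSf
  have hin : ∀ d ∈ free, d ≠ h → (pvCost costs h < pvCost costs d ∨
      (pvCost costs h = pvCost costs d ∧ pvCM h d)) := by
    intro d hd hne
    have : d ∈ PySem.List.sorted free (pvCost costs) false := (PySem.List.mem_sorted _ _ _ _).mpr hd
    rw [hs] at this
    rcases List.mem_cons.mp this with h' | h'
    · exact absurd h' hne
    · exact hSf.1 d h'
  have hpws := hpw
  rw [hsplit, List.pairwise_append] at hpws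
  rw [hsplit]
  refine pvScan_spec costs l1 h l2 ?_ ?_
  · intro d hd
    have hcm : pvCM d h := hpws.2.2 d hd _ List.mem_cons_self
    have hne : d ≠ h := by rintro rfl; exact pvCM_asymm hcm hcm
    have hdf : d ∈ free := by rw [hsplit]; exact List.mem_append_left _ hd
    rcases hin d hdf hne with h' | h'
    · exact h'
    · exact absurd h'.2 (fun hcm' => pvCM_asymm hcm' hcm)
  · intro d hd
    by_cases hne : d = h
    · exact le_of_eq (by rw [hne])
    have hdf : d ∈ free := by rw [hsplit]; exact List.mem_append_right _ (List.mem_cons_of_mem _ hd)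
    rcases hin d hdf hne with h' | h'
    · exact le_of_lt h'
    · exact le_of_eq h'.1

-- ---------- the loop simulation ----------

lemma pvContains_not_empty (s : PySem.Set Int) (x : Int) (h : s.contains x = true) :
    s.isEmpty = false := by
  cases s with
  | nil => simp [PySem.Set.contains] at h
  | cons y ys => rfl

lemma pvExists_contains (s : PySem.Set Int) (h : s.isEmpty = false) :
    ∃ x, s.contains x = true := by
  cases s with
  | nil => simp at h
  | cons y ys => exact ⟨y, by simp [PySem.Set.contains]⟩

lemma pvRemoveSub (s : PySem.Set Int) (x y : Int)
    (h : ((PySem.Set.remove? s x).getD s).contains y = true) : s.contains y = true := by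
  by_cases hx : s.contains x = true
  · rw [PySem.Set.contains_iff] at h ⊢
    simp only [PySem.Set.remove?, hx, if_true, Option.getD_some] at h
    exact ((PySem.Set.mem_discard _ _ _).mp h).1
  · simp only [PySem.Set.remove?, hx, Bool.false_eq_true, if_false] at h
    exact h

lemma pvRemoveGone (s : PySem.Set Int) (x : Int) (h : s.contains x = true) :
    ((PySem.Set.remove? s x).getD s).contains x = false := by
  simp only [PySem.Set.remove?, h, if_true, Option.getD_some]
  rw [Bool.eq_false_iff]
  intro hc
  rw [PySem.Set.contains_iff] at hc
  exact ((PySem.Set.mem_discard _ _ _).mp hc).2 rfl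

lemma pvUpd_rows_sub (j i supply demand : Int) (sup con : List Int) (rows cols : PySem.Set Int)
    (y : Int) (h : (pvUpd j i supply demand sup con rows cols).2.2.1.contains y = true) :
    rows.contains y = true := by
  unfold pvUpd at h
  split_ifs at h with h1 h2
  · exact h
  · exact pvRemoveSub rows j y h
  · exact h

lemma pvUpd_cols_sub (j i supply demand : Int) (sup con : List Int) (rows cols : PySem.Set Int)
    (y : Int) (h : (pvUpd j i supply demand sup con rows cols).2.2.2.contains y = true) :
    cols.contains y = true := by
  unfold pvUpd at h
  split_ifs at h with h1 h2
  · exact pvRemoveSub cols i y h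
  · exact h
  · exact pvRemoveSub cols i y h

lemma pvUpd_gone (j i supply demand : Int) (sup con : List Int) (rows cols : PySem.Set Int)
    (hj : rows.contains j = true) (hi : cols.contains i = true) :
    (pvUpd j i supply demand sup con rows cols).2.2.1.contains j = false ∨
      (pvUpd j i supply demand sup con rows cols).2.2.2.contains i = false := by
  unfold pvUpd
  split_ifs with h1 h2
  · exact Or.inr (pvRemoveGone cols i hi)
  · exact Or.inl (pvRemoveGone rows j hj)
  · exact Or.inr (pvRemoveGone cols i hi)

lemma pvLoop_sim (costs : List (List Int)) (m n : Int) :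
    ∀ (rq : List (Int × Int)) (table : List (List (Option Int))) (sup con : List Int)
      (rowsB colsB : List (List (Int × Int))) (rows cols : PySem.Set Int),
    rq.Pairwise (pvPrec costs) →
    (∀ c ∈ rq, 0 ≤ c.1 ∧ c.1 < m ∧ 0 ≤ c.2 ∧ c.2 < n) →
    (∀ j i : Int, rows.contains j = true → cols.contains i = true → ((j, i) : Int × Int) ∈ rq) →
    pvLoopA costs rq table sup con rowsB colsB rows cols =
      pvLoopB costs m n table sup con rowsB colsB rows cols := by
  intro rq
  induction rq with
  | nil =>
    intro table sup con rowsB colsB rows cols _ _ hact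
    have hcond : (rows.isEmpty || cols.isEmpty) = true := by
      by_contra hc
      rw [Bool.or_eq_true, not_or] at hc
      obtain ⟨j, hj⟩ := pvExists_contains rows (Bool.not_eq_true _ ▸ hc.1)
      obtain ⟨i, hi⟩ := pvExists_contains cols (Bool.not_eq_true _ ▸ hc.2)
      simpa using hact j i hj hi
    rw [pvLoopA, pvLoopB, hcond]
    rfl
  | cons c rest ih =>
    obtain ⟨j, i⟩ := c
    intro table sup con rowsB colsB rows cols hpw hrange hact
    by_cases hguard : rows.contains j = true ∧ cols.contains i = true
    · obtain ⟨hj, hi⟩ := hguard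
      have hscan := pvScan_picks costs m n rows cols j i rest hpw hrange hact hj hi
      have hre : (rows.isEmpty || cols.isEmpty) = false := by
        rw [pvContains_not_empty rows j hj, pvContains_not_empty cols i hi]
        rfl
      rw [pvLoopA, pvLoopB, hre, hscan]
      simp only [hj, hi, Bool.not_true, Bool.or_self, Bool.false_eq_true, if_false]
      show _ = pvLoopB costs m n (pvSet2 table j i _) _ _ (pvAppendAt rowsB j (j, i)) (pvAppendAt colsB i (j, i)) _ _
      by_cases hbreak : (List.isEmpty (pvUpd j i (PySem.List.pyGetD sup j 0)
          (PySem.List.pyGetD con i 0) sup con rows cols).2.2.1 ||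
          List.isEmpty (pvUpd j i (PySem.List.pyGetD sup j 0)
          (PySem.List.pyGetD con i 0) sup con rows cols).2.2.2) = true
      · rw [if_pos hbreak, pvLoopB, if_pos hbreak]
      · rw [if_neg hbreak]
        refine ih _ _ _ _ _ _ _ hpw.tail
          (fun c hc => hrange c (List.mem_cons_of_mem _ hc)) ?_
        intro j' i' h1 h2
        have hrw := pvUpd_rows_sub j i (PySem.List.pyGetD sup j 0)
          (PySem.List.pyGetD con i 0) sup con rows cols j' h1
        have hcl := pvUpd_cols_sub j i (PySem.List.pyGetD sup j 0)
          (PySem.List.pyGetD con i 0) sup con rows cols i' h2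
        rcases List.mem_cons.mp (hact j' i' hrw hcl) with heq | hmem
        · exfalso
          rw [Prod.mk.injEq] at heq
          rcases pvUpd_gone j i (PySem.List.pyGetD sup j 0)
            (PySem.List.pyGetD con i 0) sup con rows cols hj hi with hg | hg
          · rw [heq.1] at h1; rw [h1] at hg; cases hg
          · rw [heq.2] at h2; rw [h2] at hg; cases hg
        · exact hmem
    · have hg : (!(rows.contains j) || !(cols.contains i)) = true := by
        rcases Decidable.not_and_iff_or_not.mp hguard with h' | h'
        · simp only [Bool.or_eq_true, Bool.not_eq_true']
          exact Or.inl (Bool.not_eq_true _ ▸ h')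
        · simp only [Bool.or_eq_true, Bool.not_eq_true']
          exact Or.inr (Bool.not_eq_true _ ▸ h')
      rw [pvLoopA]
      simp only [hg, if_true]
      refine ih table sup con rowsB colsB rows cols hpw.tail
        (fun c hc => hrange c (List.mem_cons_of_mem _ hc)) ?_
      intro j' i' hj' hi'
      rcases List.mem_cons.mp (hact j' i' hj' hi') with heq | hmem
      · exfalso
        apply hguard
        rw [Prod.mk.injEq] at heq
        rw [heq.1] at hj'
        rw [heq.2] at hi'
        exact ⟨hj', hi'⟩
      · exact hmem

lemma pvMain_eq (table : List (List (Option Int))) (suppliers consumers : List Int)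
    (costs : List (List Int)) :
    get_basic_solution_min_price_method table suppliers consumers costs =
      get_basic_solution_min_price_method_alt table suppliers consumers costs := by
  unfold get_basic_solution_min_price_method get_basic_solution_min_price_method_alt
  dsimp only
  have hm : ∀ x : Int, x ∈ PySem.Set.ofList (PySem.List.pyRange 0 (costs.length : Int) 1) →
      0 ≤ x ∧ x < (costs.length : Int) := by
    intro x hx
    rw [PySem.Set.mem_ofList, PySem.List.mem_pyRange_one] at hx
    exact hx
  have hn : ∀ x : Int, x ∈ PySem.Set.ofList
      (PySem.List.pyRange 0 ((PySem.List.pyGetD costs 0 []).length : Int) 1) →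
      0 ≤ x ∧ x < ((PySem.List.pyGetD costs 0 []).length : Int) := by
    intro x hx
    rw [PySem.Set.mem_ofList, PySem.List.mem_pyRange_one] at hx
    exact hx
  have hcellpw : ((PySem.List.pyRange 0 ((PySem.List.pyGetD costs 0 []).length : Int) 1).flatMap
      fun i => (PySem.List.pyRange 0 (costs.length : Int) 1).map fun j => ((j, i) : Int × Int)).Pairwise pvCM :=
    pvGrid_pairwise_fwd _ _ (PySem.List.pairwise_lt_pyRange_one _ _)
      (fun _ => PySem.List.pairwise_lt_pyRange_one _ _)
  have hloop := pvLoop_sim costs (costs.length : Int) ((PySem.List.pyGetD costs 0 []).length : Int)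
    (PySem.List.sorted ((PySem.List.pyRange 0 ((PySem.List.pyGetD costs 0 []).length : Int) 1).flatMap
      fun i => (PySem.List.pyRange 0 (costs.length : Int) 1).map fun j => ((j, i) : Int × Int))
      (pvCost costs) true).reverse
    table suppliers consumers
    ((PySem.List.pyRange 0 (costs.length : Int) 1).map fun _ => ([] : List (Int × Int)))
    ((PySem.List.pyRange 0 ((PySem.List.pyGetD costs 0 []).length : Int) 1).map fun _ => ([] : List (Int × Int)))
    (PySem.Set.ofList (PySem.List.pyRange 0 (costs.length : Int) 1))
    (PySem.Set.ofList (PySem.List.pyRange 0 ((PySem.List.pyGetD costs 0 []).length : Int) 1))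
    (List.pairwise_reverse.mpr (pvSorted_rev_pairwise costs _ hcellpw))
    (by
      intro c hc
      rw [List.mem_reverse, PySem.List.mem_sorted] at hc
      simp only [List.mem_flatMap, List.mem_map, PySem.List.mem_pyRange_one] at hc
      obtain ⟨i, hi, j, hj, rfl⟩ := hc
      exact ⟨hj.1, hj.2, hi.1, hi.2⟩)
    (by
      intro j i hj hi
      rw [PySem.Set.contains_iff] at hj hi
      have hj' := hm j hj
      have hi' := hn i hi
      rw [List.mem_reverse, PySem.List.mem_sorted]
      simp only [List.mem_flatMap, List.mem_map, PySem.List.mem_pyRange_one]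
      rw [PySem.Set.mem_ofList, PySem.List.mem_pyRange_one] at hj hi
      exact ⟨i, hi, j, hj, rfl⟩)
  rw [hloop]
  set st := pvLoopB costs (costs.length : Int) ((PySem.List.pyGetD costs 0 []).length : Int)
    table suppliers consumers
    ((PySem.List.pyRange 0 (costs.length : Int) 1).map fun _ => ([] : List (Int × Int)))
    ((PySem.List.pyRange 0 ((PySem.List.pyGetD costs 0 []).length : Int) 1).map fun _ => ([] : List (Int × Int)))
    (PySem.Set.ofList (PySem.List.pyRange 0 (costs.length : Int) 1))
    (PySem.Set.ofList (PySem.List.pyRange 0 ((PySem.List.pyGetD costs 0 []).length : Int) 1)) with hst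
  by_cases hdeg : (st.2.1.map fun l => (l.length : Int)).sum <
      (costs.length : Int) + ((PySem.List.pyGetD costs 0 []).length : Int) - 1
  · rw [if_pos hdeg, if_pos hdeg]
    have hfreepw : ((PySem.List.pyRange 0 ((PySem.List.pyGetD costs 0 []).length : Int) 1).flatMap
        fun i => ((PySem.List.pyRange 0 (costs.length : Int) 1).filter fun j =>
          (PySem.List.pyGetD (PySem.List.pyGetD st.1 j []) i (some 0)).isNone).map
            fun j => ((j, i) : Int × Int)).Pairwise pvCM :=
      pvGrid_pairwise_fwd _ _ (PySem.List.pairwise_lt_pyRange_one _ _)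
        (fun _ => (PySem.List.pairwise_lt_pyRange_one _ _).filter _)
    rcases hsort : PySem.List.sorted ((PySem.List.pyRange 0 ((PySem.List.pyGetD costs 0 []).length : Int) 1).flatMap
        fun i => ((PySem.List.pyRange 0 (costs.length : Int) 1).filter fun j =>
          (PySem.List.pyGetD (PySem.List.pyGetD st.1 j []) i (some 0)).isNone).map
            fun j => ((j, i) : Int × Int)) (pvCost costs) false with _ | ⟨h, t⟩
    · have hnil := (PySem.List.sorted_eq_nil_iff _ _ _).mp hsort
      rw [hnil]
      rfl
    · rw [pvAux_pick costs _ hfreepw h t hsort]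
  · rw [if_neg hdeg, if_neg hdeg]

-- ===== VERDICT (by name: the statement is the Claim_ definition above) =====
theorem get_basic_solution_min_price_method_spec : Claim_equal_get_basic_solution_min_price_method := by
  intro table suppliers consumers costs _ _
  unfold Spec_get_basic_solution_min_price_method
  exact pvMain_eq table suppliers consumers costs
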